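-- pv_equiv track=rewrite | github.com/frisedel/advent2021 | 2021/day10/adv10.py | get_missing_chars
-- ===== SOURCE A (Python) =====
-- from typing import List
--
-- open_close = {'(': ')', '[': ']', '{': '}', '<': '>'}
--
-- def find_closing(syntax_index: int, syntax_line: List[str]):
--     depth = 0
--     for next_char in range(syntax_index, len(syntax_line)):
--         if syntax_line[next_char] in open_close.keys():
--             depth += 1
--         else:
--             depth -= 1
--             if depth == 0:
--                 return syntax_line[next_char]
--
-- def get_missing_chars(incomplete_line: List[str]) -> List[str]:
--     missing_chars: List[str] = []
--     for index in range(len(incomplete_line)):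
--         if incomplete_line[index] in open_close.keys():
--             closing = find_closing(index, incomplete_line)
--             if closing == None:
--                 opening = incomplete_line[index]
--                 missing_chars.append(open_close[opening])
--     missing_chars.reverse()
--     return missing_chars
-- ===== SOURCE B (Python) =====
-- from typing import List
--
-- open_close = {'(': ')', '[': ']', '{': '}', '<': '>'}
--
-- def get_missing_chars(incomplete_line: List[str]) -> List[str]:
--     stack: List[str] = []
--     for ch in incomplete_line:
--         if ch in open_close:
--             stack.append(ch)
--         elif stack:
--             stack.pop()
--     return [open_close[ch] for ch in reversed(stack)]
-- ===== Notes on version B (the rewrite author's own statement) =====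
-- stated objective: alternative
-- what changed: Replaced the per-opener forward depth-scan (find_closing called for every opener) by a single left-to-right pass with a stack: push openers, pop on any closer, then emit the closing chars of the surviving stack top-down; intended as asymptotically faster (O(n) vs O(n^2) worst case) but a timing run measured only ~1.3x on its inputs, so no speed is claimed.
import Mathlib
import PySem

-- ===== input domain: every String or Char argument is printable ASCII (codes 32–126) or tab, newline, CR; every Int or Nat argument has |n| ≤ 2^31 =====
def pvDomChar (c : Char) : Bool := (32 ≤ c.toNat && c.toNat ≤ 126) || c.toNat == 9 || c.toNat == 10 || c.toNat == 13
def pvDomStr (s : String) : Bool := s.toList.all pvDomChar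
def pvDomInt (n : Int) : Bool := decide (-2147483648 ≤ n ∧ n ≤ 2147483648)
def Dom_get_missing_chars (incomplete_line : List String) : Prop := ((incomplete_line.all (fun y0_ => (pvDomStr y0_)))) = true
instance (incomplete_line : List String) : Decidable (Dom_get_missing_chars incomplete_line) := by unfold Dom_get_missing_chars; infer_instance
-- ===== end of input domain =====

-- B replaces A's per-opener forward depth-scan by a single stack pass; equal return value proved on all inputs.

-- ===== PORT A =====
-- module constant open_close
def openClose : PySem.Dict String String :=
  PySem.Dict.ofList [("(", ")"), ("[", "]"), ("{", "}"), ("<", ">")]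

-- the 'for next_char in range(syntax_index, len(syntax_line))' loop of find_closing,
-- walking the suffix syntax_line[syntax_index:] with the running depth
def fcGo : Int → List String → Option String
  | _, [] => none
  | depth, c :: rest =>
    if openClose.contains c then fcGo (depth + 1) rest
    else if depth - 1 = 0 then some c
    else fcGo (depth - 1) rest

def find_closing (syntax_index : Int) (syntax_line : List String) : Option String :=
  fcGo 0 (syntax_line.drop syntax_index.toNat)

def get_missing_chars (incomplete_line : List String) : List String :=
  ((List.range incomplete_line.length).foldl (fun missing_chars index =>
      let c := incomplete_line.getD index ""
      if openClose.contains c then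
        match find_closing (Int.ofNat index) incomplete_line with
        | none => missing_chars ++ [openClose.getD c ""]
        | some _ => missing_chars
      else missing_chars) []).reverse

-- ===== PORT B =====
def get_missing_chars_alt (incomplete_line : List String) : List String :=
  let stack := incomplete_line.foldl (fun st ch =>
      if openClose.contains ch then st ++ [ch]
      else st.dropLast) []
  stack.reverse.map (fun ch => openClose.getD ch "")

-- ===== PRECONDITION & SPEC =====
def Spec_get_missing_chars (incomplete_line : List String) (out : List String) : Prop := out = get_missing_chars_alt incomplete_line
instance (incomplete_line : List String) (out : List String) : Decidable (Spec_get_missing_chars incomplete_line out) := by unfold Spec_get_missing_chars; infer_instance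

-- ===== CLAIM (what is proved, stated in full; the proofs are below) =====
def Claim_equal_get_missing_chars : Prop := ∀ (incomplete_line : List String), Dom_get_missing_chars incomplete_line → Spec_get_missing_chars incomplete_line (get_missing_chars incomplete_line)

-- ===== LEMMAS AND PROOFS =====

-- weight of one char in the depth count, and the balance of a list
def wgt (c : String) : Int := if openClose.contains c then 1 else -1
def bal (l : List String) : Int := (l.map wgt).sum

theorem bal_append (l : List String) (x : String) : bal (l ++ [x]) = bal l + wgt x := by
  simp [bal]

-- the stack of still-unmatched openers, with their indices, top first
def sP : Nat → List (Nat × String) → List String → List (Nat × String)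
  | _, st, [] => st
  | i, st, c :: rest => sP (i + 1) (if openClose.contains c then (i, c) :: st else st.tail) rest

theorem sP_append (ys : List String) (x : String) : ∀ (i : Nat) (st : List (Nat × String)),
    sP i st (ys ++ [x]) =
      if openClose.contains x then (i + ys.length, x) :: sP i st ys
      else (sP i st ys).tail := by
  induction ys with
  | nil => intro i st; simp [sP]
  | cons c rest ih =>
    intro i st
    simp only [List.cons_append, sP, ih, List.length_cons]
    ring_nf

-- appending one char to a find_closing scan
theorem fcGo_append (ys : List String) (x : String) : ∀ d : Int,
    fcGo d (ys ++ [x]) =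
      match fcGo d ys with
      | some c => some c
      | none => if openClose.contains x then none
                else if d + bal ys - 1 = 0 then some x else none := by
  induction ys with
  | nil =>
    intro d
    by_cases h : openClose.contains x = true <;> simp [h, fcGo, bal]
  | cons c rest ih =>
    intro d
    simp only [List.cons_append, fcGo]
    by_cases h : openClose.contains c = true
    · simp only [h, if_true, ih (d + 1)]
      have e : d + 1 + bal rest - 1 = d + bal (c :: rest) - 1 := by
        simp [bal, wgt, h]; ring
      rw [e]
    · by_cases h0 : d - 1 = 0
      · simp [h, h0]
      · simp only [h, h0, if_false, ih (d - 1), Bool.false_eq_true]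
        have e : d - 1 + bal rest - 1 = d + bal (c :: rest) - 1 := by
          simp [bal, wgt, h]; ring
        rw [e]

-- B's char stack is the reverse of sP's char column
theorem stackB_eq (ys : List String) : ∀ (i : Nat) (st : List (Nat × String)),
    ys.foldl (fun st ch => if openClose.contains ch then st ++ [ch] else st.dropLast)
        ((st.map Prod.snd).reverse)
      = ((sP i st ys).map Prod.snd).reverse := by
  induction ys with
  | nil => intro i st; simp [sP]
  | cons c rest ih =>
    intro i st
    simp only [List.foldl_cons, sP]
    by_cases h : openClose.contains c = true
    · simp only [h, if_true]
      have e : (st.map Prod.snd).reverse ++ [c]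
          = ((((i, c) :: st)).map Prod.snd).reverse := by simp
      rw [e, ih (i + 1)]
    · simp only [h, Bool.false_eq_true, if_false]
      have e : ((st.map Prod.snd).reverse).dropLast
          = ((st.tail).map Prod.snd).reverse := by
        simp [List.dropLast_reverse, List.map_tail]
      rw [e, ih (i + 1)]

-- main invariant about sP 0 [] xs
theorem sP_inv (xs : List String) :
    (∀ p ∈ sP 0 [] xs, p.1 < xs.length ∧ xs.getD p.1 "" = p.2 ∧ openClose.contains p.2 = true)
    ∧ ((sP 0 [] xs).map Prod.fst).Pairwise (· > ·)
    ∧ (∀ (k : Nat) (hk : k < (sP 0 [] xs).length),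
        bal (xs.drop ((sP 0 [] xs)[k].1)) = (k : Int) + 1)
    ∧ (∀ i < xs.length, openClose.contains (xs.getD i "") = true →
        (fcGo 0 (xs.drop i) = none ↔ i ∈ (sP 0 [] xs).map Prod.fst)) := by
  induction xs using List.reverseRecOn with
  | nil => simp [sP]
  | append_singleton xs x ih =>
    obtain ⟨ha, he, hc, hd⟩ := ih
    have hsp : sP 0 [] (xs ++ [x])
        = if openClose.contains x then (xs.length, x) :: sP 0 [] xs
          else (sP 0 [] xs).tail := by
      simpa using sP_append xs x 0 []
    have hgetlast : (xs ++ [x]).getD xs.length "" = x := by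
      simp [List.getD_eq_getElem?_getD]
    have hget : ∀ i < xs.length, (xs ++ [x]).getD i "" = xs.getD i "" := by
      intro i hi
      simp [List.getD_eq_getElem?_getD, List.getElem?_append_left hi]
    have hdroplast : (xs ++ [x]).drop xs.length = [x] := by
      simp
    have hdrop : ∀ i ≤ xs.length, (xs ++ [x]).drop i = xs.drop i ++ [x] := by
      intro i hi
      rw [List.drop_append_of_le_length hi]
    rw [hsp]
    by_cases hx : openClose.contains x = true
    · simp only [hx, if_true]
      refine ⟨?_, ?_, ?_, ?_⟩
      · -- (a)
        intro p hp
        rcases List.mem_cons.mp hp with rfl | hp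
        · exact ⟨by simp, hgetlast, hx⟩
        · obtain ⟨h1, h2, h3⟩ := ha p hp
          exact ⟨by simp; omega, by rw [hget p.1 h1]; exact h2, h3⟩
      · -- (e)
        simp only [List.map_cons, List.pairwise_cons]
        refine ⟨?_, he⟩
        intro b hb
        rcases List.mem_map.mp hb with ⟨p, hp, hpb⟩
        have := (ha p hp).1
        omega
      · -- (c)
        intro k hk
        cases k with
        | zero =>
          simp only [List.getElem_cons_zero, hdroplast]
          simp [bal, wgt, hx]
        | succ k =>
          have hk' : k < (sP 0 [] xs).length := by
            simpa using hk
          simp only [List.getElem_cons_succ]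
          have hi := (ha _ (List.getElem_mem hk')).1
          rw [hdrop _ (Nat.le_of_lt hi), bal_append, hc k hk']
          simp [wgt, hx]
      · -- (d)
        intro i hi hopen
        rcases Nat.lt_succ_iff_lt_or_eq.mp (by simpa using hi) with hi' | rfl
        · rw [hget i hi'] at hopen
          rw [hdrop i (Nat.le_of_lt hi'), fcGo_append]
          have hne : i ≠ xs.length := Nat.ne_of_lt hi'
          cases hfc : fcGo 0 (xs.drop i) with
          | some c =>
            have hnot : i ∉ (sP 0 [] xs).map Prod.fst := by
              intro hmem
              have := (hd i hi' hopen).mpr hmem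
              simp [this] at hfc
            simp [hne, hnot]
          | none =>
            have hmem := (hd i hi' hopen).mp hfc
            simp [hx, hne, hmem]
        · -- i = xs.length
          rw [hdroplast]
          simp [fcGo, hx]
    · simp only [hx, Bool.false_eq_true, if_false]
      refine ⟨?_, ?_, ?_, ?_⟩
      · -- (a)
        intro p hp
        obtain ⟨h1, h2, h3⟩ := ha p (List.mem_of_mem_tail hp)
        exact ⟨by simp; omega, by rw [hget p.1 h1]; exact h2, h3⟩
      · -- (e)
        exact he.sublist ((List.tail_sublist _).map Prod.fst)
      · -- (c)
        intro k hk
        have hk1 : k + 1 < (sP 0 [] xs).length := by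
          rw [List.length_tail] at hk; omega
        rw [List.getElem_tail]
        have hi := (ha _ (List.getElem_mem hk1)).1
        rw [hdrop _ (Nat.le_of_lt hi), bal_append, hc (k + 1) hk1]
        simp [wgt, hx]
      · -- (d)
        intro i hi hopen
        rcases Nat.lt_succ_iff_lt_or_eq.mp (by simpa using hi) with hi' | rfl
        · rw [hget i hi'] at hopen
          rw [hdrop i (Nat.le_of_lt hi'), fcGo_append]
          cases hfc : fcGo 0 (xs.drop i) with
          | some c =>
            have hnot : i ∉ ((sP 0 [] xs).tail).map Prod.fst := by
              intro hmem
              rcases List.mem_map.mp hmem with ⟨p, hp, hpi⟩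
              have := (hd i hi' hopen).mpr
                (List.mem_map.mpr ⟨p, List.mem_of_mem_tail hp, hpi⟩)
              simp [this] at hfc
            simp only [List.map_tail] at hnot
            simp [hnot]
          | none =>
            have hmem := (hd i hi' hopen).mp hfc
            rcases List.mem_map.mp hmem with ⟨p, hp, hpi⟩
            rcases List.mem_iff_getElem.mp hp with ⟨k, hk, hkp⟩
            have hbal : bal (xs.drop i) = (k : Int) + 1 := by
              have := hc k hk
              rw [hkp, hpi] at this
              exact this
            simp only [hx, Bool.false_eq_true, if_false, hbal]
            by_cases hk0 : k = 0
            · subst hk0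
              rw [if_pos (by norm_num)]
              simp only [reduceCtorEq, false_iff]
              intro hmem'
              rcases List.mem_map.mp hmem' with ⟨q, hq, hqi⟩
              rcases List.mem_iff_getElem.mp hq with ⟨k', hk', hkq⟩
              have hk'1 : k' + 1 < (sP 0 [] xs).length := by
                rw [List.length_tail] at hk'; omega
              have hq1 : (sP 0 [] xs)[k' + 1] = q := by
                rw [← List.getElem_tail]; exact hkq
              have hb2 := hc (k' + 1) hk'1
              rw [hq1, hqi] at hb2
              rw [hbal] at hb2
              push_cast at hb2
              omega
            · rw [if_neg (by omega)]
              simp only [true_iff]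
              have hk1 : k - 1 < (sP 0 [] xs).tail.length := by
                rw [List.length_tail]; omega
              refine List.mem_map.mpr ⟨p, ?_, hpi⟩
              have hpt : (sP 0 [] xs).tail[k - 1] = p := by
                rw [List.getElem_tail]
                simpa [Nat.sub_add_cancel (Nat.one_le_iff_ne_zero.mpr hk0)] using hkp
              exact hpt ▸ List.getElem_mem hk1
        · -- i = xs.length: contradiction, x is not an opener
          rw [hgetlast] at hopen
          exact absurd hopen hx


-- filter of a range by membership in a sorted bounded list
theorem filter_range'_mem : ∀ (len s : Nat) (J : List Nat), J.Pairwise (· < ·) →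
    (∀ j ∈ J, s ≤ j ∧ j < s + len) →
    (List.range' s len).filter (fun i => decide (i ∈ J)) = J := by
  intro len
  induction len with
  | zero =>
    intro s J _ hb
    have : J = [] := by
      cases J with
      | nil => rfl
      | cons a tl => exact absurd (hb a (by simp)) (by omega)
    simp [this]
  | succ len ih =>
    intro s J hp hb
    rw [List.range'_succ]
    cases J with
    | nil => simp
    | cons a tl =>
      by_cases h : a = s
      · subst h
        have hmem : a ∈ a :: tl := by simp
        rw [List.filter_cons_of_pos (by simp)]
        have hstep : (List.range' (a + 1) len).filter (fun i => decide (i ∈ a :: tl))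
            = (List.range' (a + 1) len).filter (fun i => decide (i ∈ tl)) := by
          apply List.filter_congr
          intro i hi
          have hai : a + 1 ≤ i := (List.mem_range'_1.mp hi).1
          simp only [decide_eq_decide, List.mem_cons]
          constructor
          · rintro (rfl | hmem)
            · omega
            · exact hmem
          · intro hmem; exact Or.inr hmem
        rw [hstep, ih (a + 1) tl hp.of_cons]
        intro j hj
        have := List.rel_of_pairwise_cons hp hj
        have := hb j (by simp [hj])
        omega
      · have hs : s ∉ a :: tl := by
          intro hmem
          rcases List.mem_cons.mp hmem with rfl | hmem
          · exact h rfl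
          · have := List.rel_of_pairwise_cons hp hmem
            have := hb a (by simp)
            omega
        rw [List.filter_cons_of_neg (by simpa using hs)]
        apply ih (s + 1) (a :: tl) hp
        intro j hj
        rcases List.mem_cons.mp hj with rfl | hmem
        · have := hb j (by simp)
          omega
        · have := List.rel_of_pairwise_cons hp hmem
          have := hb a (by simp)
          have := hb j (by simp [hmem])
          omega

-- ===== VERDICT (by name: the statement is the Claim_ definition above) =====
-- main assembly
theorem ports_agree (l : List String) : get_missing_chars l = get_missing_chars_alt l := by
  obtain ⟨ha, he, hc, hd⟩ := sP_inv l
  -- B side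
  have hstk := stackB_eq l 0 []
  simp only [List.map_nil, List.reverse_nil] at hstk
  have hB : get_missing_chars_alt l
      = ((sP 0 [] l).map Prod.snd).map (fun ch => openClose.getD ch "") := by
    simp only [get_missing_chars_alt, hstk, List.reverse_reverse]
  -- A side: rewrite the loop body into append-if form
  have hbody : (fun (missing_chars : List String) (index : Nat) =>
      let c := l.getD index ""
      if openClose.contains c then
        match find_closing (Int.ofNat index) l with
        | none => missing_chars ++ [openClose.getD c ""]
        | some _ => missing_chars
      else missing_chars)
    = (fun acc index =>
        if (openClose.contains (l.getD index "") && (fcGo 0 (l.drop index)).isNone) = true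
        then acc ++ [openClose.getD (l.getD index "") ""] else acc) := by
    funext acc index
    simp only [find_closing, Int.ofNat_eq_natCast, Int.toNat_natCast,
      List.getD_eq_getElem?_getD]
    by_cases h : openClose.contains (l[index]?.getD "") = true
    · cases hfc : fcGo 0 (l.drop index) <;> simp [h]
    · simp [h]
  have hA : get_missing_chars l
      = (((List.range l.length).filter
          (fun index => openClose.contains (l.getD index "") && (fcGo 0 (l.drop index)).isNone)).map
          (fun index => openClose.getD (l.getD index "") "")).reverse := by
    unfold get_missing_chars
    rw [hbody, PySem.List.foldl_append_if]
    simp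
  -- the filtered range is exactly the reversed index column of the stack
  have hfilter : (List.range l.length).filter
        (fun index => openClose.contains (l.getD index "") && (fcGo 0 (l.drop index)).isNone)
      = ((sP 0 [] l).map Prod.fst).reverse := by
    have hcongr : ∀ i ∈ List.range l.length,
        (openClose.contains (l.getD i "") && (fcGo 0 (l.drop i)).isNone)
          = decide (i ∈ ((sP 0 [] l).map Prod.fst).reverse) := by
      intro i hi
      have hi' : i < l.length := List.mem_range.mp hi
      by_cases h : openClose.contains (l.getD i "") = true
      · have := hd i hi' h
        simp only [h, Bool.true_and, List.mem_reverse]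
        by_cases hn : fcGo 0 (l.drop i) = none
        · simp [hn, this.mp hn]
        · have : i ∉ (sP 0 [] l).map Prod.fst := fun hmem => hn (this.mpr hmem)
          cases hfc : fcGo 0 (l.drop i) with
          | none => exact absurd hfc hn
          | some c => simp [this]
      · have : i ∉ (sP 0 [] l).map Prod.fst := by
          intro hmem
          rcases List.mem_map.mp hmem with ⟨p, hp, hpi⟩
          have := (ha p hp).2.1
          have := (ha p hp).2.2
          rw [hpi] at *
          simp_all
        simp only [List.getD_eq_getElem?_getD] at h
        simp [h, this]
    rw [List.filter_congr hcongr]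
    rw [List.range_eq_range']
    apply filter_range'_mem
    · rw [List.pairwise_reverse]
      exact he
    · intro j hj
      rcases List.mem_map.mp (List.mem_reverse.mp hj) with ⟨p, hp, hpi⟩
      exact ⟨Nat.zero_le _, by simpa [hpi] using (ha p hp).1⟩
  rw [hA, hfilter, hB]
  rw [List.map_reverse, List.reverse_reverse, List.map_map, List.map_map]
  apply List.map_congr_left
  intro p hp
  have hgp := (ha p hp).2.1
  simp only [List.getD_eq_getElem?_getD] at hgp
  simp [hgp]

-- ===== VERDICT (by name: the statement is the Claim_ definition above) =====
theorem get_missing_chars_spec : Claim_equal_get_missing_chars := by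
  intro l _
  exact ports_agree l
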